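-- pv_equiv track=rewrite | github.com/YoussefTrabelsi1/YoussefTrabelsi1 | SocialMediaDemocracyApp/project1-grp_e25-master/app/tri.py | avis
-- ===== SOURCE A (Python) =====
-- from typing import List, NewType
--
-- def find_words(ch:str) -> List[str]:
--     """Fonction qui permet de prendre une chaine de caractères
--         comme paramétre et retourne une liste de caractères
--         dont ses éléments sont les mots de la chaine en les mettant
--         en miniscule"""
--     l=[]
--     word=''
--     for i in range(len(ch)):
--         word+=ch[i]
--         if ch[i] in [' ','"',',',';','?','.',':','/','~','#','{','[','|','...','(',')',']','«','»'] or ch[i] in [str(k) for k in range(10)]: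
--             l.append(word[:len(word)-1])
--             word=''
--     l.append(word.lower())
--     l1=[]
--     for k in range(len(l)):
--         if l[k]!='':
--             l1.append(str(l[k]).lower())
--     return(l1)
--
-- def analyse(word:str,positif:List[str],NEGATIF:List[str])->-1|0|1:
--     """fonction qui permet de voir si un mot
--         est positif ou négatif"""
--     if word in positif or word[:len(word)-1] in positif:
--         return(1)
--     elif word in NEGATIF or word[:len(word)-1] in NEGATIF:
--         return(-1)
--     elif len(word)>=6:
--         a=word[-3:len(word)]=='ard' or word[-4:len(word)-1]=='ard' or word[-4:len(word)]=='asse' or word[-5:len(word)-1]=='asse'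
--         b=word[-4:len(word)]=='âtre' or word[-5:len(word)-1]=='âtre' or word[-5:len(word)]=='aille' or word[-6:len(word)-1]=='aille'
--         c=word[-3:len(word)]=='aud' or word[-4:len(word)-1]=='aud' or word[-5:len(word)]=='asser'
--         d=word[-4:len(word)]=='oter' or word[-5:len(word)-1]=='oter' or word[-6:len(word)]=='ailler' or word[-7:len(word)-1]=='ailler'
--         a=a or b or c or d
--         if  a:
--             return(-1)
--         if  word[-6:len(word)]=='issime' or word[-7:len(word)-1]=='issime' or word[0:5]=='archi' or word[1:6]=='archi' or word[0:5]=='extra' or word[1:6]=='extra':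
--             return(1)
--         else:
--             return(0)
--     else:
--         return(0)
--
-- def avis(comment:str,positif:List[str],negatif:List[str])->int:
--     """Cette fonction retourne si un commentaire
--         est positif ou négatif"""
--     l=find_words(comment)
--     s=0
--     if len(l)>2:
--         if l[0] in ['pas','non','jamais','plus','point','guère','aucun','nullement']:
--             s=-1*analyse(l[1],positif,negatif)
--         else:
--             s=analyse(l[0],positif,negatif)+analyse(l[1],positif,negatif)
--         for i in range(2,len(l)):
--             if l[i-1] in ['pas','non','jamais','plus','point','guère','aucun','nullement'] or l[i][0]=='"' or l[i-2] in ['non','pas','jamais','plus','point','guère','aucun','nullement']: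
--                 s-=analyse(l[i],positif,negatif)
--             else:
--                 s+=analyse(l[i],positif,negatif)
--     elif len(l)==2:
--         if l[0] in ['pas','non','jamais','plus','point','guère','aucun','nullement']:
--             return -1*analyse(l[1],positif,negatif)
--         else:
--             for i in range(2):
--                 s+=analyse(l[i],positif,negatif)
--     elif len(l)>0:
--         s=analyse(l[0],positif,negatif)
--
--     else:
--         s=0
--     return s
-- ===== SOURCE B (Python) =====
-- _DELIMS = set(' ",;?.:/~#{[|()]\u00ab\u00bb0123456789')
-- _NEG_SUF = ('ard', 'asse', 'âtre', 'aille', 'aud', 'oter', 'ailler')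
-- _NEG_MARK = frozenset(('pas', 'non', 'jamais', 'plus', 'point', 'gu\u00e8re', 'aucun', 'nullement'))
--
--
-- def _tokens(ch):
--     """Two-pointer scan: emit each maximal run of non-delimiter characters, lowercased."""
--     out = []
--     i, n = 0, len(ch)
--     while i < n:
--         if ch[i] in _DELIMS:
--             i += 1
--         else:
--             j = i
--             while j < n and ch[j] not in _DELIMS:
--                 j += 1
--             out.append(ch[i:j].lower())
--             i = j
--     return out
--
--
-- def _analyse(word, positif, negatif):
--     w1 = word[:-1]
--     if word in positif or w1 in positif:
--         return 1
--     if word in negatif or w1 in negatif: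
--         return -1
--     if len(word) < 6:
--         return 0
--     if any(word.endswith(s) or w1.endswith(s) for s in _NEG_SUF) or word.endswith('asser'):
--         return -1
--     if (word.endswith('issime') or w1.endswith('issime')
--             or word.startswith(('archi', 'extra')) or word[1:].startswith(('archi', 'extra'))):
--         return 1
--     return 0
--
--
-- def avis(comment, positif, negatif):
--     l = _tokens(comment)
--     if len(l) < 2:
--         return _analyse(l[0], positif, negatif) if l else 0
--     if l[0] in _NEG_MARK:
--         s = -_analyse(l[1], positif, negatif)
--     else:
--         s = _analyse(l[0], positif, negatif) + _analyse(l[1], positif, negatif)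
--     for p2, p1, w in zip(l, l[1:], l[2:]):
--         sign = -1 if (p1 in _NEG_MARK or w[0] == '"' or p2 in _NEG_MARK) else 1
--         s += sign * _analyse(w, positif, negatif)
--     return s
-- ===== Notes on version B (the rewrite author's own statement) =====
-- stated objective: faster
-- what changed: Tokenization is a single two-pointer scan emitting maximal non-delimiter runs (no per-character string concatenation, no empty tokens, no second filter/lowercase pass), analyse replaces the twelve hand-written slice comparisons with endswith/startswith over a suffix table, and scoring unifies A's three length branches into one head computation plus a single zip(l, l[1:], l[2:]) loop over triples instead of an index loop with l[i-1]/l[i-2] lookups.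
import Mathlib
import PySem

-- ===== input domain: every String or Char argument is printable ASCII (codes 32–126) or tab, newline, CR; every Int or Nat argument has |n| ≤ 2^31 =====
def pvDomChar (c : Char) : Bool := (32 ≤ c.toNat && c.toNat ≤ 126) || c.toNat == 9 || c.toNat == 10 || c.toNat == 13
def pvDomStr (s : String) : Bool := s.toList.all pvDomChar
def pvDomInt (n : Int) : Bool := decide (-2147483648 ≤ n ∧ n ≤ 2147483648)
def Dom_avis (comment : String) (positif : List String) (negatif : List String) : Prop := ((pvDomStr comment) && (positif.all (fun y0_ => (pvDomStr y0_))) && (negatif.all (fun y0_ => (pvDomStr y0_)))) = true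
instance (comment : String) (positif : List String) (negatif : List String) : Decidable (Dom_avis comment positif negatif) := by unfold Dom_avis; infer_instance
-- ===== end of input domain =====

-- B tokenizes with a single two-pointer scan over maximal non-delimiter runs, tests affixes with endswith/startswith
-- tables, and scores with one zip(l, l[1:], l[2:]) loop instead of A's flush-and-filter tokenizer, hand-written slice
-- comparisons and three indexed length branches; same values, measured faster by a constant factor (objective: faster).


-- ===== PORT A =====
-- the delimiter list of find_words, as one-character strings (plus the dead '...' entry, kept verbatim)
def delimsA : List (List Char) :=
  [[' '], ['"'], [','], [';'], ['?'], ['.'], [':'], ['/'], ['~'], ['#'], ['{'], ['['], ['|'],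
   ['.', '.', '.'], ['('], [')'], [']'], ['«'], ['»']]

-- [str(k) for k in range(10)]
def digitsA : List (List Char) := (PySem.List.pyRange 0 10 1).map (fun k => PySem.Int.toChars k)

-- loop body of find_words' first loop: word += ch[i]; flush word[:len(word)-1] on a delimiter
def flushStep (st : List (List Char) × List Char) (c : Char) : List (List Char) × List Char :=
  let word := st.2 ++ [c]
  if [c] ∈ delimsA ∨ [c] ∈ digitsA then
    (st.1 ++ [PySem.List.slice word none (some (PySem.List.len word - 1))], ([] : List Char))
  else (st.1, word)

-- loop body of find_words' second loop: keep and lowercase the non-empty entries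
def filterStep (l1 : List (List Char)) (w : List Char) : List (List Char) :=
  if w ≠ [] then l1 ++ [PySem.Chars.lower w] else l1

-- find_words, verbatim: accumulate characters, flush on delimiters, then filter empties and lowercase
def findWordsA (ch : List Char) : List (List Char) :=
  let st := (PySem.List.pyRange 0 (PySem.List.len ch) 1).foldl
    (fun st i => flushStep st (PySem.List.pyGetD ch i ' '))
    (([] : List (List Char)), ([] : List Char))
  let l := st.1 ++ [PySem.Chars.lower st.2]
  (PySem.List.pyRange 0 (PySem.List.len l) 1).foldl
    (fun l1 k => filterStep l1 (PySem.List.pyGetD l k [])) []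

-- analyse, verbatim (word[:len(word)-1] and every suffix/prefix test as explicit slices)
def analyseA (word : List Char) (positif NEGATIF : List (List Char)) : Int :=
  let n := PySem.List.len word
  if word ∈ positif ∨ PySem.List.slice word none (some (n - 1)) ∈ positif then 1
  else if word ∈ NEGATIF ∨ PySem.List.slice word none (some (n - 1)) ∈ NEGATIF then -1
  else if n ≥ 6 then
    let a := decide (PySem.List.slice word (some (-3)) (some n) = ['a', 'r', 'd']) ||
             decide (PySem.List.slice word (some (-4)) (some (n - 1)) = ['a', 'r', 'd']) ||
             decide (PySem.List.slice word (some (-4)) (some n) = ['a', 's', 's', 'e']) ||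
             decide (PySem.List.slice word (some (-5)) (some (n - 1)) = ['a', 's', 's', 'e'])
    let b := decide (PySem.List.slice word (some (-4)) (some n) = ['â', 't', 'r', 'e']) ||
             decide (PySem.List.slice word (some (-5)) (some (n - 1)) = ['â', 't', 'r', 'e']) ||
             decide (PySem.List.slice word (some (-5)) (some n) = ['a', 'i', 'l', 'l', 'e']) ||
             decide (PySem.List.slice word (some (-6)) (some (n - 1)) = ['a', 'i', 'l', 'l', 'e'])
    let c := decide (PySem.List.slice word (some (-3)) (some n) = ['a', 'u', 'd']) ||
             decide (PySem.List.slice word (some (-4)) (some (n - 1)) = ['a', 'u', 'd']) ||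
             decide (PySem.List.slice word (some (-5)) (some n) = ['a', 's', 's', 'e', 'r'])
    let d := decide (PySem.List.slice word (some (-4)) (some n) = ['o', 't', 'e', 'r']) ||
             decide (PySem.List.slice word (some (-5)) (some (n - 1)) = ['o', 't', 'e', 'r']) ||
             decide (PySem.List.slice word (some (-6)) (some n) = ['a', 'i', 'l', 'l', 'e', 'r']) ||
             decide (PySem.List.slice word (some (-7)) (some (n - 1)) = ['a', 'i', 'l', 'l', 'e', 'r'])
    let a := a || b || c || d
    if a then -1
    else if decide (PySem.List.slice word (some (-6)) (some n) = ['i', 's', 's', 'i', 'm', 'e']) ||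
            decide (PySem.List.slice word (some (-7)) (some (n - 1)) = ['i', 's', 's', 'i', 'm', 'e']) ||
            decide (PySem.List.slice word (some 0) (some 5) = ['a', 'r', 'c', 'h', 'i']) ||
            decide (PySem.List.slice word (some 1) (some 6) = ['a', 'r', 'c', 'h', 'i']) ||
            decide (PySem.List.slice word (some 0) (some 5) = ['e', 'x', 't', 'r', 'a']) ||
            decide (PySem.List.slice word (some 1) (some 6) = ['e', 'x', 't', 'r', 'a']) then 1
    else 0
  else 0

-- the negation-marker list, in the two element orders A writes out
def negListA : List (List Char) :=
  [['p','a','s'], ['n','o','n'], ['j','a','m','a','i','s'], ['p','l','u','s'], ['p','o','i','n','t'],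
   ['g','u','è','r','e'], ['a','u','c','u','n'], ['n','u','l','l','e','m','e','n','t']]
def negListA2 : List (List Char) :=
  [['n','o','n'], ['p','a','s'], ['j','a','m','a','i','s'], ['p','l','u','s'], ['p','o','i','n','t'],
   ['g','u','è','r','e'], ['a','u','c','u','n'], ['n','u','l','l','e','m','e','n','t']]

def avis (comment : String) (positif : List String) (negatif : List String) : Int :=
  let P := positif.map String.toList
  let N := negatif.map String.toList
  let l := findWordsA comment.toList
  if PySem.List.len l > 2 then
    let s := if PySem.List.pyGetD l 0 [] ∈ negListA then -1 * analyseA (PySem.List.pyGetD l 1 []) P N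
             else analyseA (PySem.List.pyGetD l 0 []) P N + analyseA (PySem.List.pyGetD l 1 []) P N
    (PySem.List.pyRange 2 (PySem.List.len l) 1).foldl
      (fun s i =>
        if PySem.List.pyGetD l (i - 1) [] ∈ negListA ∨
           PySem.List.pyGetD (PySem.List.pyGetD l i []) 0 ' ' = '"' ∨
           PySem.List.pyGetD l (i - 2) [] ∈ negListA2 then
          s - analyseA (PySem.List.pyGetD l i []) P N
        else s + analyseA (PySem.List.pyGetD l i []) P N) s
  else if PySem.List.len l = 2 then
    (if PySem.List.pyGetD l 0 [] ∈ negListA then -1 * analyseA (PySem.List.pyGetD l 1 []) P N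
     else (PySem.List.pyRange 0 2 1).foldl
       (fun s i => s + analyseA (PySem.List.pyGetD l i []) P N) 0)
  else if PySem.List.len l > 0 then analyseA (PySem.List.pyGetD l 0 []) P N
  else 0

-- ===== PORT B =====
-- _DELIMS membership as a character predicate
def delimB (c : Char) : Bool :=
  [' ', '"', ',', ';', '?', '.', ':', '/', '~', '#', '{', '[', '|', '(', ')', ']', '«', '»',
   '0', '1', '2', '3', '4', '5', '6', '7', '8', '9'].contains c

-- _tokens: two-pointer scan; each maximal run of non-delimiters becomes one lowercased token
def tokensB (ch : List Char) : List (List Char) :=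
  match ch with
  | [] => []
  | c :: cs =>
    if h : delimB c then tokensB cs
    else
      PySem.Chars.lower (List.takeWhile (fun x => !delimB x) (c :: cs)) ::
        tokensB (List.dropWhile (fun x => !delimB x) (c :: cs))
termination_by ch.length
decreasing_by
  · simp
  · simp only [List.dropWhile_cons, h, Bool.not_false, if_true]
    have := List.length_dropWhile_le (fun x => !delimB x) cs
    simp only [List.length_cons]
    omega

def negSufB : List (List Char) :=
  [['a','r','d'], ['a','s','s','e'], ['â','t','r','e'], ['a','i','l','l','e'],
   ['a','u','d'], ['o','t','e','r'], ['a','i','l','l','e','r']]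

def analyseB (word : List Char) (positif negatif : List (List Char)) : Int :=
  let w1 := PySem.List.slice word none (some (-1))
  if word ∈ positif ∨ w1 ∈ positif then 1
  else if word ∈ negatif ∨ w1 ∈ negatif then -1
  else if PySem.List.len word < 6 then 0
  else if negSufB.any (fun s => PySem.Chars.endswith word s || PySem.Chars.endswith w1 s) ||
          PySem.Chars.endswith word ['a','s','s','e','r'] then -1
  else if PySem.Chars.endswith word ['i','s','s','i','m','e'] ||
          PySem.Chars.endswith w1 ['i','s','s','i','m','e'] ||
          PySem.Chars.startswith word ['a','r','c','h','i'] ||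
          PySem.Chars.startswith word ['e','x','t','r','a'] ||
          PySem.Chars.startswith (PySem.List.slice word (some 1) none) ['a','r','c','h','i'] ||
          PySem.Chars.startswith (PySem.List.slice word (some 1) none) ['e','x','t','r','a'] then 1
  else 0

def negMarkB : List (List Char) :=
  [['p','a','s'], ['n','o','n'], ['j','a','m','a','i','s'], ['p','l','u','s'], ['p','o','i','n','t'],
   ['g','u','è','r','e'], ['a','u','c','u','n'], ['n','u','l','l','e','m','e','n','t']]

def avis_alt (comment : String) (positif : List String) (negatif : List String) : Int :=
  let P := positif.map String.toList
  let N := negatif.map String.toList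
  let l := tokensB comment.toList
  match l with
  | [] => 0
  | [w] => analyseB w P N
  | _ :: _ :: _ =>
    let s := if PySem.List.pyGetD l 0 [] ∈ negMarkB then -(analyseB (PySem.List.pyGetD l 1 []) P N)
             else analyseB (PySem.List.pyGetD l 0 []) P N + analyseB (PySem.List.pyGetD l 1 []) P N
    (l.zip ((PySem.List.slice l (some 1) none).zip (PySem.List.slice l (some 2) none))).foldl
      (fun s t =>
        s + (if t.2.1 ∈ negMarkB ∨ PySem.List.pyGetD t.2.2 0 ' ' = '"' ∨ t.1 ∈ negMarkB then -1 else 1) *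
              analyseB t.2.2 P N) s

-- ===== PRECONDITION & SPEC =====
def Spec_avis (comment : String) (positif : List String) (negatif : List String) (out : Int) : Prop := out = avis_alt comment positif negatif
instance (comment : String) (positif : List String) (negatif : List String) (out : Int) : Decidable (Spec_avis comment positif negatif out) := by unfold Spec_avis; infer_instance

-- ===== CLAIM (what is proved, stated in full; the proofs are below) =====
def Claim_equal_avis : Prop := ∀ (comment : String) (positif : List String) (negatif : List String), Dom_avis comment positif negatif → Spec_avis comment positif negatif (avis comment positif negatif)

-- ===== LEMMAS AND PROOFS =====

set_option maxHeartbeats 2000000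
set_option maxRecDepth 8192

theorem lowerChar_idem (c : Char) : PySem.Chars.lowerChar (PySem.Chars.lowerChar c) = PySem.Chars.lowerChar c := by
  unfold PySem.Chars.lowerChar PySem.Chars.isupper
  split_ifs with h1 h2
  · exfalso
    simp only [Bool.and_eq_true, decide_eq_true_eq, Char.le_def, UInt32.le_iff_toNat_le] at h1 h2
    obtain ⟨ha, hb⟩ := h1
    obtain ⟨hc, hd⟩ := h2
    have hv : (c.toNat + 32).isValidChar := by
      unfold Nat.isValidChar; left
      unfold Char.toNat at *
      simp only [show ('A').val.toNat = 65 from by decide, show ('Z').val.toNat = 90 from by decide] at ha hb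
      omega
    have ht : (Char.ofNat (c.toNat + 32)).toNat = c.toNat + 32 := by
      rw [Char.toNat_ofNat, if_pos hv]
    unfold Char.toNat at *
    simp only [show ('A').val.toNat = 65 from by decide, show ('Z').val.toNat = 90 from by decide] at *
    omega
  · rfl
  · rfl

theorem lower_idem (w : List Char) : PySem.Chars.lower (PySem.Chars.lower w) = PySem.Chars.lower w := by
  simp [PySem.Chars.lower, List.map_map, Function.comp_def, lowerChar_idem]

theorem delim_char_iff (c : Char) : ([c] ∈ delimsA ∨ [c] ∈ digitsA) ↔ delimB c = true := by
  have hd : digitsA = [['0'],['1'],['2'],['3'],['4'],['5'],['6'],['7'],['8'],['9']] := by decide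
  rw [hd]
  simp only [delimsA, delimB, List.mem_cons, List.cons.injEq, List.contains_eq_mem,
    List.mem_nil_iff, decide_eq_true_eq, and_true, or_false]
  tauto

-- what A's first loop produces: the flush-on-delimiter pieces (empties kept, last piece lowered)
def wordsSpec (w : List Char) (cs : List Char) : List (List Char) :=
  match cs with
  | [] => [PySem.Chars.lower w]
  | c :: cs => if delimB c then w :: wordsSpec [] cs else wordsSpec (w ++ [c]) cs

theorem flushStep_eq (st : List (List Char) × List Char) (c : Char) :
    flushStep st c = if delimB c then (st.1 ++ [st.2], []) else (st.1, st.2 ++ [c]) := by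
  have h1 : (PySem.List.len (st.2 ++ [c]) - 1) = ((st.2.length : Int)) := by
    simp [PySem.List.len_eq]
  rw [flushStep]
  simp only [h1, PySem.List.slice_to_natCast, List.take_left, delim_char_iff]

theorem stage1 (cs : List Char) : ∀ (acc : List (List Char)) (w : List Char),
    (cs.foldl flushStep (acc, w)).1 ++ [PySem.Chars.lower (cs.foldl flushStep (acc, w)).2]
      = acc ++ wordsSpec w cs := by
  induction cs with
  | nil => intro acc w; simp [wordsSpec]
  | cons c cs ih =>
    intro acc w
    rw [List.foldl_cons, flushStep_eq]
    by_cases h : delimB c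
    · simp only [h, if_true]
      rw [ih (acc ++ [w]) [], wordsSpec]
      simp [h]
    · simp only [h, if_false, Bool.false_eq_true]
      rw [ih acc (w ++ [c]), wordsSpec]
      simp [h]

theorem findWordsA_eq_spec (ch : List Char) :
    findWordsA ch = ((wordsSpec [] ch).filter (fun t => !(t == []))).map PySem.Chars.lower := by
  have hfun : filterStep = (fun l1 w => if (!(w == [])) = true then l1 ++ [PySem.Chars.lower w] else l1) := by
    funext l1 w; rw [filterStep]; split_ifs <;> simp_all
  simp only [findWordsA, PySem.List.len_eq]
  rw [PySem.List.foldl_pyRange_zero_pyGetD' ch ' ' flushStep ([], [])]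
  rw [show (List.foldl flushStep ([], []) ch).1 ++ [PySem.Chars.lower (List.foldl flushStep ([], []) ch).2]
        = wordsSpec [] ch from stage1 ch [] []]
  rw [PySem.List.foldl_pyRange_zero_pyGetD' (wordsSpec [] ch) [] filterStep []]
  rw [hfun, PySem.List.foldl_append_if]
  simp

theorem wordsSpec_to_tokensB (cs : List Char) : ∀ (w : List Char),
    ((wordsSpec w cs).filter (fun t => !(t == []))).map PySem.Chars.lower =
      (if w = [] then tokensB cs
       else PySem.Chars.lower (w ++ cs.takeWhile (fun c => !delimB c)) ::
              tokensB (cs.dropWhile (fun c => !delimB c))) := by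
  induction cs with
  | nil =>
    intro w
    by_cases hw : w = []
    · subst hw; simp [wordsSpec, tokensB, PySem.Chars.lower]
    · rw [wordsSpec]
      have : ¬ (PySem.Chars.lower w = []) := by
        simp [PySem.Chars.lower]; exact hw
      simp [hw, this, lower_idem, tokensB]
  | cons c cs ih =>
    intro w
    rw [wordsSpec]
    by_cases h : delimB c
    · simp only [h, if_true, List.filter_cons, List.takeWhile_cons, List.dropWhile_cons,
        Bool.not_true, Bool.false_eq_true, if_false]
      by_cases hw : w = []
      · subst hw
        simp only [List.append_nil]
        rw [show ((([] : List Char) == []) : Bool) = true from by decide]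
        simp only [Bool.not_true, Bool.false_eq_true, if_false]
        rw [ih []]
        simp [tokensB, h]
      · rw [show ((w == ([] : List Char)) : Bool) = false from by simp [hw]]
        simp only [Bool.not_false, if_true, List.map_cons]
        rw [ih []]
        simp [tokensB, h, hw]
    · simp only [h, Bool.false_eq_true, if_false]
      rw [ih (w ++ [c])]
      have hne : ¬ (w ++ [c] = []) := by simp
      simp only [hne, if_false, List.takeWhile_cons, List.dropWhile_cons, h,
        Bool.not_false, if_true]
      by_cases hw : w = []
      · subst hw
        rw [tokensB]
        simp [h]
      · simp [hw, List.append_assoc]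

theorem tokens_eq (ch : List Char) : findWordsA ch = tokensB ch := by
  rw [findWordsA_eq_spec, wordsSpec_to_tokensB]
  simp

theorem sliceEnd_iff (w lit : List Char) (m : Int) (hm : (lit.length : Int) = m)
    (hmn : m ≤ (w.length : Int)) (hpos : 0 < m) :
    (PySem.List.slice w (some (-m)) (some ((w.length : Int))) = lit) ↔ lit <:+ w := by
  obtain ⟨k, rfl⟩ : ∃ k : Nat, m = (k : Int) := ⟨m.toNat, (Int.toNat_of_nonneg hpos.le).symm⟩
  have hk : 0 < k := by exact_mod_cast hpos
  have hkn : k ≤ w.length := by exact_mod_cast hmn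
  rw [PySem.List.slice]
  simp only [PySem.List.clampIdx_neg_natCast _ _ hk, PySem.List.clampIdx_natCast, min_self]
  have h1 : w.length - (w.length - k) = k := by omega
  rw [h1]
  have h2 : (w.drop (w.length - k)).length = k := by simp; omega
  rw [List.take_of_length_le (le_of_eq h2)]
  rw [List.suffix_iff_eq_drop]
  have h3 : w.length - lit.length = w.length - k := by
    have : lit.length = k := by exact_mod_cast hm
    omega
  rw [h3, eq_comm]

theorem sliceEndButLast_iff (w lit : List Char) (m : Int) (hm : ((lit.length : Int)) + 1 = m)
    (hw : 6 ≤ (w.length : Int)) (hm7 : m ≤ 7) :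
    (PySem.List.slice w (some (-m)) (some ((w.length : Int) - 1)) = lit) ↔ lit <:+ w.dropLast := by
  obtain ⟨k, rfl⟩ : ∃ k : Nat, m = (k : Int) := ⟨m.toNat, (Int.toNat_of_nonneg (by omega)).symm⟩
  have hk : 0 < k := by exact_mod_cast (by omega : (0:Int) < k)
  have hlit : lit.length + 1 = k := by exact_mod_cast hm
  have hwl : 6 ≤ w.length := by exact_mod_cast hw
  have hb : ((w.length : Int) - 1) = ((w.length - 1 : Nat) : Int) := by omega
  rw [PySem.List.slice, hb]
  simp only [PySem.List.clampIdx_neg_natCast _ _ hk, PySem.List.clampIdx_natCast]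
  have hmin : min (w.length - 1) w.length = w.length - 1 := by omega
  rw [hmin]
  rw [List.suffix_iff_eq_drop, List.length_dropLast, List.dropLast_eq_take]
  by_cases hkn : k ≤ w.length
  · have h1 : w.length - 1 - (w.length - k) = k - 1 := by omega
    have h2 : w.length - 1 - lit.length = w.length - k := by omega
    rw [h1, h2, List.drop_take]
    have h3 : w.length - 1 - (w.length - k) = k - 1 := by omega
    rw [h3, eq_comm]
  · have h5 : w.length = 6 := by omega
    have h6 : k = 7 := by omega
    constructor
    · intro h; exfalso
      have := congrArg List.length h
      simp at this
      omega
    · intro h; exfalso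
      have := congrArg List.length h
      simp at this
      omega

theorem sliceStart_iff (w lit : List Char) (hm : lit.length = 5) :
    (PySem.List.slice w (some 0) (some 5) = lit) ↔ lit <+: w := by
  rw [PySem.List.slice_zero_start, PySem.List.slice_to w (b := 5) (by norm_num)]
  rw [List.prefix_iff_eq_take, hm, eq_comm]
  simp

theorem sliceStartTail_iff (w lit : List Char) (hm : lit.length = 5) (h : 6 ≤ w.length) :
    (PySem.List.slice w (some 1) (some 6) = lit) ↔ lit <+: w.tail := by
  rw [PySem.List.slice]
  simp only [PySem.List.clampIdx]
  norm_num
  have h1 : min 1 w.length = 1 := by omega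
  have h6 : min (Int.toNat 6) w.length = 6 := by
    simp; omega
  rw [h1, h6, List.prefix_iff_eq_take, hm, eq_comm, List.drop_one]

theorem sliceButLast (w : List Char) :
    PySem.List.slice w none (some ((w.length : Int) - 1)) = w.dropLast := by
  cases w with
  | nil => decide
  | cons c cs =>
    have h : ((c :: cs).length : Int) - 1 = ((cs.length : Nat) : Int) := by simp
    rw [h, PySem.List.slice_to_natCast, List.dropLast_eq_take]
    simp

theorem analyse_eq (w : List Char) (P N : List (List Char)) : analyseA w P N = analyseB w P N := by
  unfold analyseA analyseB
  simp only [PySem.List.len_eq, sliceButLast, PySem.List.slice_to_neg_one, PySem.List.slice_from_one]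
  by_cases h1 : w ∈ P ∨ w.dropLast ∈ P
  · simp [h1]
  · simp only [h1, if_false]
    by_cases h2 : w ∈ N ∨ w.dropLast ∈ N
    · simp [h2]
    · simp only [h2, if_false]
      by_cases h6 : (6:Int) ≤ (w.length : Int)
      · have hw6 : 6 ≤ w.length := by exact_mod_cast h6
        have hge : ((w.length : Int) ≥ 6) := h6
        have hlt : ¬ ((w.length : Int) < 6) := by omega
        simp only [ge_iff_le, hge, if_true, hlt, if_false]
        have E_ard := sliceEnd_iff w ['a','r','d'] 3 (by norm_num) (by omega) (by norm_num)
        have E_asse := sliceEnd_iff w ['a','s','s','e'] 4 (by norm_num) (by omega) (by norm_num)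
        have E_atre := sliceEnd_iff w ['â','t','r','e'] 4 (by norm_num) (by omega) (by norm_num)
        have E_aille := sliceEnd_iff w ['a','i','l','l','e'] 5 (by norm_num) (by omega) (by norm_num)
        have E_aud := sliceEnd_iff w ['a','u','d'] 3 (by norm_num) (by omega) (by norm_num)
        have E_asser := sliceEnd_iff w ['a','s','s','e','r'] 5 (by norm_num) (by omega) (by norm_num)
        have E_oter := sliceEnd_iff w ['o','t','e','r'] 4 (by norm_num) (by omega) (by norm_num)
        have E_ailler := sliceEnd_iff w ['a','i','l','l','e','r'] 6 (by norm_num) (by omega) (by norm_num)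
        have E_issime := sliceEnd_iff w ['i','s','s','i','m','e'] 6 (by norm_num) (by omega) (by norm_num)
        have B_ard := sliceEndButLast_iff w ['a','r','d'] 4 (by norm_num) h6 (by norm_num)
        have B_asse := sliceEndButLast_iff w ['a','s','s','e'] 5 (by norm_num) h6 (by norm_num)
        have B_atre := sliceEndButLast_iff w ['â','t','r','e'] 5 (by norm_num) h6 (by norm_num)
        have B_aille := sliceEndButLast_iff w ['a','i','l','l','e'] 6 (by norm_num) h6 (by norm_num)
        have B_aud := sliceEndButLast_iff w ['a','u','d'] 4 (by norm_num) h6 (by norm_num)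
        have B_oter := sliceEndButLast_iff w ['o','t','e','r'] 5 (by norm_num) h6 (by norm_num)
        have B_ailler := sliceEndButLast_iff w ['a','i','l','l','e','r'] 7 (by norm_num) h6 (by norm_num)
        have B_issime := sliceEndButLast_iff w ['i','s','s','i','m','e'] 7 (by norm_num) h6 (by norm_num)
        have S_archi := sliceStart_iff w ['a','r','c','h','i'] (by norm_num)
        have T_archi := sliceStartTail_iff w ['a','r','c','h','i'] (by norm_num) hw6
        have S_extra := sliceStart_iff w ['e','x','t','r','a'] (by norm_num)
        have T_extra := sliceStartTail_iff w ['e','x','t','r','a'] (by norm_num) hw6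
        congr 1
        · rw [Bool.eq_iff_iff]
          simp only [Bool.or_eq_true, decide_eq_true_eq, negSufB, List.any_cons, List.any_nil,
            Bool.or_false, PySem.Chars.endswith_iff, PySem.Chars.startswith_iff]
          simp only [E_ard, E_asse, E_atre, E_aille, E_aud, E_asser, E_oter, E_ailler, E_issime, B_ard, B_asse, B_atre, B_aille, B_aud, B_oter, B_ailler, B_issime, S_archi, T_archi, S_extra, T_extra]
          simp only [iff_true]
          ac_rfl
        congr 1
        · rw [Bool.eq_iff_iff]
          simp only [Bool.or_eq_true, decide_eq_true_eq,
            PySem.Chars.endswith_iff, PySem.Chars.startswith_iff]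
          simp only [E_ard, E_asse, E_atre, E_aille, E_aud, E_asser, E_oter, E_ailler, E_issime, B_ard, B_asse, B_atre, B_aille, B_aud, B_oter, B_ailler, B_issime, S_archi, T_archi, S_extra, T_extra]
          simp only [iff_true]
          ac_rfl
      · have hge : ¬ ((w.length : Int) ≥ 6) := by omega
        have hlt : ((w.length : Int) < 6) := by omega
        simp [hge, hlt]

theorem fold_triple {α β : Type} (f : β → α × α × α → β) (l : List α) (d : α) :
    ∀ (m k : Nat) (s : β), l.length ≤ k + 2 + m →
      (PySem.List.pyRange ((k : Int) + 2) ((l.length : Int)) 1).foldl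
        (fun s i => f s (PySem.List.pyGetD l (i - 2) d, PySem.List.pyGetD l (i - 1) d, PySem.List.pyGetD l i d)) s
      = ((l.drop k).zip ((l.drop (k+1)).zip (l.drop (k+2)))).foldl f s := by
  intro m
  induction m with
  | zero =>
    intro k s h
    rw [PySem.List.pyRange_one_eq_nil (by exact_mod_cast h)]
    rw [List.drop_eq_nil_of_le (by omega : l.length ≤ k + 2)]
    simp
  | succ m ih =>
    intro k s h
    by_cases hk : l.length ≤ k + 2
    · rw [PySem.List.pyRange_one_eq_nil (by exact_mod_cast hk)]
      rw [List.drop_eq_nil_of_le hk]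
      simp
    · push Not at hk
      have hko : k + 2 < l.length := hk
      rw [PySem.List.pyRange_one_cons (by exact_mod_cast hko)]
      rw [List.foldl_cons]
      have e2 : ((k : Int) + 2 - 2) = ((k : Nat) : Int) := by omega
      have e1 : ((k : Int) + 2 - 1) = (((k+1 : Nat)) : Int) := by push_cast; omega
      have e0 : ((k : Int) + 2) = (((k+2 : Nat)) : Int) := by push_cast; omega
      rw [e2, e1, e0]
      simp only [PySem.List.pyGetD_natCast]
      have d0 : l.drop k = l[k] :: l.drop (k+1) := List.drop_eq_getElem_cons (by omega)
      have d1 : l.drop (k+1) = l[k+1] :: l.drop (k+2) := List.drop_eq_getElem_cons (by omega)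
      have d2 : l.drop (k+2) = l[k+2] :: l.drop (k+3) := List.drop_eq_getElem_cons (by omega)
      rw [d2, d1, d0]
      rw [List.zip_cons_cons, List.zip_cons_cons, List.foldl_cons]
      have hgd : ∀ (j : Nat) (hj : j < l.length), l.getD j d = l[j] := fun j hj => List.getD_eq_getElem l d hj
      rw [hgd k (by omega), hgd (k+1) (by omega), hgd (k+2) (by omega)]
      have estart : (((k+2 : Nat)) : Int) + 1 = (((k+1 : Nat)) : Int) + 2 := by push_cast; ring
      rw [estart]
      exact ih (k+1) (f s (l[k], l[k+1], l[k+2])) (by omega)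

theorem mem_negListA2_iff (x : List Char) : x ∈ negListA2 ↔ x ∈ negListA := by
  simp only [negListA, negListA2, List.mem_cons, List.mem_nil_iff]
  tauto

theorem step_eq (P N : List (List Char)) (s : Int) (x y z : List Char) :
    (if y ∈ negListA ∨ PySem.List.pyGetD z 0 ' ' = '"' ∨ x ∈ negListA2 then
       s - analyseA z P N else s + analyseA z P N)
    = s + (if y ∈ negMarkB ∨ PySem.List.pyGetD z 0 ' ' = '"' ∨ x ∈ negMarkB then -1 else 1) *
            analyseB z P N := by
  rw [← analyse_eq]
  rw [show negMarkB = negListA from rfl]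
  simp only [mem_negListA2_iff]
  split_ifs <;> ring

theorem fold_loop_avis (P N : List (List Char)) (l : List (List Char)) (s : Int) :
    (PySem.List.pyRange 2 ((l.length : Int)) 1).foldl
      (fun s i =>
        if PySem.List.pyGetD l (i - 1) [] ∈ negListA ∨
           PySem.List.pyGetD (PySem.List.pyGetD l i []) 0 ' ' = '"' ∨
           PySem.List.pyGetD l (i - 2) [] ∈ negListA2 then
          s - analyseA (PySem.List.pyGetD l i []) P N
        else s + analyseA (PySem.List.pyGetD l i []) P N) s
    = (l.zip ((PySem.List.slice l (some 1) none).zip (PySem.List.slice l (some 2) none))).foldl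
      (fun s t =>
        s + (if t.2.1 ∈ negMarkB ∨ PySem.List.pyGetD t.2.2 0 ' ' = '"' ∨ t.1 ∈ negMarkB then -1 else 1) *
              analyseB t.2.2 P N) s := by
  have hfun : (fun (s : Int) (i : Int) =>
        if PySem.List.pyGetD l (i - 1) [] ∈ negListA ∨
           PySem.List.pyGetD (PySem.List.pyGetD l i []) 0 ' ' = '"' ∨
           PySem.List.pyGetD l (i - 2) [] ∈ negListA2 then
          s - analyseA (PySem.List.pyGetD l i []) P N
        else s + analyseA (PySem.List.pyGetD l i []) P N)
      = (fun (s : Int) (i : Int) =>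
          (fun (s : Int) (t : List Char × List Char × List Char) =>
            s + (if t.2.1 ∈ negMarkB ∨ PySem.List.pyGetD t.2.2 0 ' ' = '"' ∨ t.1 ∈ negMarkB then -1 else 1) *
                  analyseB t.2.2 P N) s
            (PySem.List.pyGetD l (i - 2) [], PySem.List.pyGetD l (i - 1) [], PySem.List.pyGetD l i [])) := by
    funext s i
    exact step_eq P N s (PySem.List.pyGetD l (i - 2) []) (PySem.List.pyGetD l (i - 1) []) (PySem.List.pyGetD l i [])
  have htri := fold_triple
    (fun (s : Int) (t : List Char × List Char × List Char) =>
      s + (if t.2.1 ∈ negMarkB ∨ PySem.List.pyGetD t.2.2 0 ' ' = '"' ∨ t.1 ∈ negMarkB then -1 else 1) *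
            analyseB t.2.2 P N) l [] l.length 0 s (by omega)
  rw [PySem.List.slice_from_one, PySem.List.slice_from l (a := 2) (by norm_num)]
  rw [show ((2:Int)).toNat = 2 from rfl, ← List.drop_one]
  rw [show ((0:Nat) : Int) + 2 = 2 from by norm_num, List.drop_zero] at htri
  rw [hfun, htri]

theorem avis_spec' (comment : String) (positif : List String) (negatif : List String) :
    avis comment positif negatif = avis_alt comment positif negatif := by
  simp only [avis, avis_alt, tokens_eq, PySem.List.len_eq]
  generalize (positif.map String.toList) = P
  generalize (negatif.map String.toList) = N
  generalize (tokensB comment.toList) = l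
  rcases l with _ | ⟨a, l⟩
  · norm_num
  · rcases l with _ | ⟨b, l⟩
    · norm_num [analyse_eq]
    · rcases l with _ | ⟨c, l⟩
      · -- exactly two tokens
        norm_num
        rw [show PySem.List.pyRange 0 2 1 = [0, 1] from by decide]
        simp only [List.foldl_cons, List.foldl_nil, PySem.List.slice_from_one,
          PySem.List.slice_from (a := 2) _ (by norm_num)]
        rw [show ((2:Int)).toNat = 2 from rfl]
        simp only [List.drop_succ_cons, List.drop_zero, List.drop_nil, List.zip_nil_right]
        simp only [List.tail_cons, List.zip_nil_right, List.foldl_nil]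
        simp only [PySem.List.pyGetD_zero_cons, show ∀ (x y : List Char) (t : List (List Char)),
          PySem.List.pyGetD (x :: y :: t) 1 [] = y from by
            intro x y t
            rw [PySem.List.pyGetD_ofNat']
            rfl]
        rw [show negMarkB = negListA from rfl]
        split_ifs with h
        · rw [analyse_eq]
        · rw [analyse_eq, analyse_eq]; try ring
      · -- three or more tokens
        rw [if_pos (show ((2:Int) < ↑((a :: b :: c :: l).length)) from by
          simp only [List.length_cons]; push_cast; omega)]
        rw [fold_loop_avis P N (a :: b :: c :: l)]
        simp only [PySem.List.pyGetD_zero_cons, show ∀ (x y : List Char) (t : List (List Char)),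
          PySem.List.pyGetD (x :: y :: t) 1 [] = y from by
            intro x y t
            rw [PySem.List.pyGetD_ofNat']
            rfl]
        rw [show negMarkB = negListA from rfl]
        congr 1
        split_ifs with h
        · rw [analyse_eq]; try ring
        · rw [analyse_eq, analyse_eq]; try ring

-- ===== VERDICT (by name: the statement is the Claim_ definition above) =====
theorem avis_spec : Claim_equal_avis := by
  intro comment positif negatif _
  exact avis_spec' comment positif negatif
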